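-- pv_equiv track=rewrite | github.com/franciscojgsalguero1/Ejercicios_Python_1roDAW | pruebas/ordenar_lista.py | lista_ordenada
-- ===== SOURCE A (Python) =====
-- def lista_ordenada(numeros):
--
--     mayor = 0;
--     menor = 0;
--     igual = 0;
--     ordenada = True;
--
--     for i in range(0, len(numeros)):
--         for j in range(i+1, len(numeros)):
--             if(numeros[i] < numeros[j]):
--                 mayor += 1;
--             elif( numeros[i] > numeros[j]):
--                 menor += 1;
--             else:
--                 igual += 1;
--
--     if((mayor != 0 and igual != 0) or (mayor != 0 and menor != 0) or (menor != 0 and igual != 0)):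
--         ordenada = False;
--
--     return ordenada;
-- ===== SOURCE B (Python) =====
-- def lista_ordenada(numeros):
--     pairs = list(zip(numeros, numeros[1:]))
--     return (all(a < b for a, b in pairs)
--             or all(a > b for a, b in pairs)
--             or all(a == b for a, b in pairs))
-- ===== Notes on version B (the rewrite author's own statement) =====
-- stated objective: faster
-- what changed: Replaces the all-pairs double loop with three counters by a single linear pass over adjacent pairs checking strictly increasing / strictly decreasing / all-equal.
import Mathlib
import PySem

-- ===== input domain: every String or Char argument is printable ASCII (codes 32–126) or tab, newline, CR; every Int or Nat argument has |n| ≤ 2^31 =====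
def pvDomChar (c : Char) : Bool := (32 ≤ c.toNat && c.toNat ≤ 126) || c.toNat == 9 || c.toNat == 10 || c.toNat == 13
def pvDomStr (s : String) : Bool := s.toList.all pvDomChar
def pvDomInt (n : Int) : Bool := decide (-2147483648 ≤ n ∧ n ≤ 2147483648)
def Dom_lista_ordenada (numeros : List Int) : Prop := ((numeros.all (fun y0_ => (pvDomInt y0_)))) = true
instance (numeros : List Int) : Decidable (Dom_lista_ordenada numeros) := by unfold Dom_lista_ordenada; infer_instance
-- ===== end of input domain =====

-- B replaces A's all-pairs double loop with one linear pass over adjacent pairs (strictly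
-- increasing / strictly decreasing / all-equal); return values are proved identical.

-- ===== PORT A =====
-- literal transliteration of A: two nested index loops counting <, >, = pairs, then the final test
def lista_ordenada (numeros : List Int) : Bool :=
  let n : Int := PySem.List.len numeros
  let s : Int × Int × Int :=
    (PySem.List.pyRange 0 n 1).foldl (fun s i =>
      (PySem.List.pyRange (i + 1) n 1).foldl (fun s j =>
        if PySem.List.pyGetD numeros i 0 < PySem.List.pyGetD numeros j 0 then
          (s.1 + 1, s.2.1, s.2.2)
        else if PySem.List.pyGetD numeros i 0 > PySem.List.pyGetD numeros j 0 then
          (s.1, s.2.1 + 1, s.2.2)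
        else
          (s.1, s.2.1, s.2.2 + 1)) s) (0, 0, 0)
  let ordenada := true
  if (s.1 ≠ 0 ∧ s.2.2 ≠ 0) ∨ (s.1 ≠ 0 ∧ s.2.1 ≠ 0) ∨ (s.2.1 ≠ 0 ∧ s.2.2 ≠ 0) then false
  else ordenada

-- ===== PORT B =====
-- literal transliteration of Source B: pairs = zip(numeros, numeros[1:]); three all(...) passes
def lista_ordenada_alt (numeros : List Int) : Bool :=
  let pairs := numeros.zip (PySem.List.slice numeros (some 1) none)
  (pairs.all fun p => decide (p.1 < p.2)) ||
  (pairs.all fun p => decide (p.1 > p.2)) ||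
  (pairs.all fun p => p.1 == p.2)

-- ===== PRECONDITION & SPEC =====
def Spec_lista_ordenada (numeros : List Int) (out : Bool) : Prop := out = lista_ordenada_alt numeros
instance (numeros : List Int) (out : Bool) : Decidable (Spec_lista_ordenada numeros out) := by unfold Spec_lista_ordenada; infer_instance

-- ===== CLAIM (what is proved, stated in full; the proofs are below) =====
def Claim_equal_lista_ordenada : Prop := ∀ (numeros : List Int), Dom_lista_ordenada numeros → Spec_lista_ordenada numeros (lista_ordenada numeros)

-- ===== LEMMAS AND PROOFS =====

-- A's inner-loop body, as a step function on the counter triple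
def pvStep (x : Int) (s : Int × Int × Int) (y : Int) : Int × Int × Int :=
  if x < y then (s.1 + 1, s.2.1, s.2.2)
  else if x > y then (s.1, s.2.1 + 1, s.2.2)
  else (s.1, s.2.1, s.2.2 + 1)

-- the list of all (numeros[i], numeros[j]) with i < j
def pvAllPairs : List Int → List (Int × Int)
  | [] => []
  | x :: xs => xs.map (fun y => (x, y)) ++ pvAllPairs xs

-- structural form of A's double loop
def pvCountA : List Int → Int × Int × Int → Int × Int × Int
  | [], s => s
  | x :: xs, s => pvCountA xs (xs.foldl (pvStep x) s)

lemma pvOuter (l : List Int) : ∀ (k : Nat) (a : Int) (s : Int × Int × Int),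
    0 ≤ a → a.toNat + k = l.length →
    (PySem.List.pyRange a (PySem.List.len l) 1).foldl (fun s i =>
      (PySem.List.pyRange (i + 1) (PySem.List.len l) 1).foldl (fun s j =>
        if PySem.List.pyGetD l i 0 < PySem.List.pyGetD l j 0 then (s.1 + 1, s.2.1, s.2.2)
        else if PySem.List.pyGetD l i 0 > PySem.List.pyGetD l j 0 then (s.1, s.2.1 + 1, s.2.2)
        else (s.1, s.2.1, s.2.2 + 1)) s) s
    = pvCountA (l.drop a.toNat) s := by
  intro k
  induction k with
  | zero =>
      intro a s ha hk
      rw [PySem.List.len_eq, PySem.List.pyRange_one_eq_nil (by omega)]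
      simp [List.drop_eq_nil_of_le (by omega : l.length ≤ a.toNat), pvCountA]
  | succ k ih =>
      intro a s ha hk
      rw [PySem.List.pyRange_one_cons (show a < PySem.List.len l by rw [PySem.List.len_eq]; omega),
          List.foldl_cons]
      have hinner :
          (PySem.List.pyRange (a + 1) (PySem.List.len l) 1).foldl (fun s j =>
            if PySem.List.pyGetD l a 0 < PySem.List.pyGetD l j 0 then (s.1 + 1, s.2.1, s.2.2)
            else if PySem.List.pyGetD l a 0 > PySem.List.pyGetD l j 0 then (s.1, s.2.1 + 1, s.2.2)
            else (s.1, s.2.1, s.2.2 + 1)) s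
          = (l.drop (a + 1).toNat).foldl (pvStep (PySem.List.pyGetD l a 0)) s := by
        have h := PySem.List.foldl_pyRange_pyGetD l 0 (pvStep (PySem.List.pyGetD l a 0)) s
          (show (0:Int) ≤ a + 1 by omega)
        simpa [pvStep] using h
      rw [hinner, ih (a + 1) _ (by omega) (by omega)]
      have hlt : a.toNat < l.length := by omega
      have hdrop : l.drop a.toNat = l[a.toNat] :: l.drop (a.toNat + 1) :=
        List.drop_eq_getElem_cons hlt
      have hget : PySem.List.pyGetD l a 0 = l[a.toNat] :=
        PySem.List.pyGetD_eq_getElem l 0 ha (by omega)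
      have htn : (a + 1).toNat = a.toNat + 1 := by omega
      rw [hdrop, htn, hget, pvCountA]

lemma pvCountA_eq (l : List Int) : ∀ s,
    pvCountA l s = (pvAllPairs l).foldl (fun s p => pvStep p.1 s p.2) s := by
  induction l with
  | nil => intro s; rfl
  | cons x xs ih =>
      intro s
      rw [pvCountA, pvAllPairs, List.foldl_append, ih]
      congr 1
      rw [List.foldl_map]

lemma pvFoldCounts (ps : List (Int × Int)) : ∀ s : Int × Int × Int,
    ps.foldl (fun s p => pvStep p.1 s p.2) s =
      (s.1 + (ps.countP (fun p => decide (p.1 < p.2)) : Int),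
       s.2.1 + (ps.countP (fun p => decide (p.2 < p.1)) : Int),
       s.2.2 + (ps.countP (fun p => p.1 == p.2) : Int)) := by
  induction ps with
  | nil => intro s; simp
  | cons p ps ih =>
      intro s
      rw [List.foldl_cons, ih]
      simp only [List.countP_cons]
      unfold pvStep
      split_ifs with h1 h2 <;>
        simp_all [Prod.ext_iff, ne_of_lt, ne_of_gt, not_lt] <;> omega

lemma pvAdjIff (f : Int → Int → Bool)
    (htrans : ∀ a b c, f a b = true → f b c = true → f a c = true) :
    ∀ l : List Int, ((l.zip l.tail).all fun p => f p.1 p.2) = true ↔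
      ∀ p ∈ pvAllPairs l, f p.1 p.2 = true := by
  intro l
  induction l with
  | nil => simp [pvAllPairs]
  | cons x xs ih =>
      cases xs with
      | nil => simp [pvAllPairs]
      | cons y t =>
          constructor
          · intro h p hp
            simp only [List.tail_cons, List.zip_cons_cons, List.all_cons, Bool.and_eq_true] at h
            obtain ⟨hxy, hrest⟩ := h
            have hall : ∀ q ∈ pvAllPairs (y :: t), f q.1 q.2 = true := ih.mp (by simpa using hrest)
            rw [pvAllPairs, List.mem_append] at hp
            rcases hp with hp | hp
            · obtain ⟨z, hz, rfl⟩ := List.mem_map.mp hp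
              rcases List.mem_cons.mp hz with rfl | hzt
              · exact hxy
              · have hyz : f y z = true := by
                  apply hall (y, z)
                  rw [pvAllPairs, List.mem_append]
                  exact Or.inl (List.mem_map.mpr ⟨z, hzt, rfl⟩)
                exact htrans x y z hxy hyz
            · exact hall p hp
          · intro h
            simp only [List.tail_cons, List.zip_cons_cons, List.all_cons, Bool.and_eq_true]
            refine ⟨h (x, y) ?_, ?_⟩
            · rw [pvAllPairs, List.mem_append]
              exact Or.inl (List.mem_map.mpr ⟨y, by simp, rfl⟩)
            · have := ih.mpr (fun q hq => h q (by rw [pvAllPairs, List.mem_append]; exact Or.inr hq))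
              simpa using this

set_option maxHeartbeats 1000000 in
lemma pvMain (l : List Int) : lista_ordenada l = lista_ordenada_alt l := by
  have hcounts : pvCountA l ((0:Int), (0:Int), (0:Int)) =
      (((pvAllPairs l).countP (fun p => decide (p.1 < p.2)) : Int),
       ((pvAllPairs l).countP (fun p => decide (p.2 < p.1)) : Int),
       ((pvAllPairs l).countP (fun p => p.1 == p.2) : Int)) := by
    rw [pvCountA_eq, pvFoldCounts]
    simp
  have hA : lista_ordenada l =
      (if (((pvAllPairs l).countP (fun p => decide (p.1 < p.2)) : Int) ≠ 0 ∧
            ((pvAllPairs l).countP (fun p => p.1 == p.2) : Int) ≠ 0) ∨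
          (((pvAllPairs l).countP (fun p => decide (p.1 < p.2)) : Int) ≠ 0 ∧
            ((pvAllPairs l).countP (fun p => decide (p.2 < p.1)) : Int) ≠ 0) ∨
          (((pvAllPairs l).countP (fun p => decide (p.2 < p.1)) : Int) ≠ 0 ∧
            ((pvAllPairs l).countP (fun p => p.1 == p.2) : Int) ≠ 0)
        then false else true) := by
    simp only [lista_ordenada]
    rw [pvOuter l l.length 0 (0, 0, 0) le_rfl (by simp),
        show ((0:Int).toNat) = 0 from rfl, List.drop_zero, hcounts]
  have hB : lista_ordenada_alt l =
      (((l.zip l.tail).all fun p => decide (p.1 < p.2)) ||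
       ((l.zip l.tail).all fun p => decide (p.2 < p.1)) ||
       ((l.zip l.tail).all fun p => p.1 == p.2)) := by
    simp only [lista_ordenada_alt, PySem.List.slice_from_one, gt_iff_lt]
  have h1 := pvAdjIff (fun a b => decide (a < b))
    (fun a b c hab hbc => by simp only [decide_eq_true_eq] at hab hbc ⊢; omega) l
  have h2 := pvAdjIff (fun a b => decide (b < a))
    (fun a b c hab hbc => by simp only [decide_eq_true_eq] at hab hbc ⊢; omega) l
  have h3 := pvAdjIff (fun a b => a == b)
    (fun a b c hab hbc => by simp only [beq_iff_eq] at hab hbc ⊢; omega) l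
  rw [hA, hB]
  by_cases hC : (((pvAllPairs l).countP (fun p => decide (p.1 < p.2)) : Int) ≠ 0 ∧
            ((pvAllPairs l).countP (fun p => p.1 == p.2) : Int) ≠ 0) ∨
          (((pvAllPairs l).countP (fun p => decide (p.1 < p.2)) : Int) ≠ 0 ∧
            ((pvAllPairs l).countP (fun p => decide (p.2 < p.1)) : Int) ≠ 0) ∨
          (((pvAllPairs l).countP (fun p => decide (p.2 < p.1)) : Int) ≠ 0 ∧
            ((pvAllPairs l).countP (fun p => p.1 == p.2) : Int) ≠ 0)
  · rw [if_pos hC]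
    -- each of the three "all" passes must fail: its truth zeroes two of the counters
    have hb1 : ((l.zip l.tail).all fun p => decide (p.1 < p.2)) = false := by
      rw [Bool.eq_false_iff]
      intro hb
      have hall := h1.mp hb
      have hz2 : (pvAllPairs l).countP (fun p => decide (p.2 < p.1)) = 0 :=
        List.countP_eq_zero.mpr (fun p hp => by
          have h := hall p hp
          simp only [decide_eq_true_eq] at h ⊢
          omega)
      have hz3 : (pvAllPairs l).countP (fun p => p.1 == p.2) = 0 :=
        List.countP_eq_zero.mpr (fun p hp => by
          have h := hall p hp
          simp only [decide_eq_true_eq] at h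
          simp only [beq_iff_eq]
          omega)
      rcases hC with ⟨_, h⟩ | ⟨_, h⟩ | ⟨h, _⟩
      · exact h (by exact_mod_cast hz3)
      · exact h (by exact_mod_cast hz2)
      · exact h (by exact_mod_cast hz2)
    have hb2 : ((l.zip l.tail).all fun p => decide (p.2 < p.1)) = false := by
      rw [Bool.eq_false_iff]
      intro hb
      have hall := h2.mp hb
      have hz1 : (pvAllPairs l).countP (fun p => decide (p.1 < p.2)) = 0 :=
        List.countP_eq_zero.mpr (fun p hp => by
          have h := hall p hp
          simp only [decide_eq_true_eq] at h ⊢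
          omega)
      have hz3 : (pvAllPairs l).countP (fun p => p.1 == p.2) = 0 :=
        List.countP_eq_zero.mpr (fun p hp => by
          have h := hall p hp
          simp only [decide_eq_true_eq] at h
          simp only [beq_iff_eq]
          omega)
      rcases hC with ⟨h, _⟩ | ⟨h, _⟩ | ⟨_, h⟩
      · exact h (by exact_mod_cast hz1)
      · exact h (by exact_mod_cast hz1)
      · exact h (by exact_mod_cast hz3)
    have hb3 : ((l.zip l.tail).all fun p => p.1 == p.2) = false := by
      rw [Bool.eq_false_iff]
      intro hb
      have hall := h3.mp hb
      have hz1 : (pvAllPairs l).countP (fun p => decide (p.1 < p.2)) = 0 :=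
        List.countP_eq_zero.mpr (fun p hp => by
          have h := hall p hp
          simp only [beq_iff_eq] at h
          simp only [decide_eq_true_eq]
          omega)
      have hz2 : (pvAllPairs l).countP (fun p => decide (p.2 < p.1)) = 0 :=
        List.countP_eq_zero.mpr (fun p hp => by
          have h := hall p hp
          simp only [beq_iff_eq] at h
          simp only [decide_eq_true_eq]
          omega)
      rcases hC with ⟨h, _⟩ | ⟨h, _⟩ | ⟨h, _⟩
      · exact h (by exact_mod_cast hz1)
      · exact h (by exact_mod_cast hz1)
      · exact h (by exact_mod_cast hz2)
    rw [hb1, hb2, hb3]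
    rfl
  · rw [if_neg hC]
    push Not at hC
    obtain ⟨hc13, hc12, hc23⟩ := hC
    -- at most one counter is nonzero: the corresponding linear pass succeeds
    by_cases hz1 : (pvAllPairs l).countP (fun p => decide (p.1 < p.2)) = 0
    · by_cases hz2 : (pvAllPairs l).countP (fun p => decide (p.2 < p.1)) = 0
      · -- no < and no > pairs: all pairs equal
        have hall : ∀ p ∈ pvAllPairs l, (p.1 == p.2) = true := by
          intro p hp
          have e1 := List.countP_eq_zero.mp hz1 p hp
          have e2 := List.countP_eq_zero.mp hz2 p hp
          simp only [decide_eq_true_eq] at e1 e2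
          simp only [beq_iff_eq]
          omega
        rw [h3.mpr hall]
        simp
      · -- some > pair, hence no < and no =: strictly decreasing
        have hc2i : ((pvAllPairs l).countP (fun p => decide (p.2 < p.1)) : Int) ≠ 0 := by
          exact_mod_cast hz2
        have hz3 : (pvAllPairs l).countP (fun p => p.1 == p.2) = 0 := by
          exact_mod_cast hc23 hc2i
        have hall : ∀ p ∈ pvAllPairs l, (decide (p.2 < p.1)) = true := by
          intro p hp
          have e1 := List.countP_eq_zero.mp hz1 p hp
          have e3 := List.countP_eq_zero.mp hz3 p hp
          simp only [decide_eq_true_eq] at e1 ⊢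
          simp only [beq_iff_eq] at e3
          omega
        rw [h2.mpr hall]
        simp
    · -- some < pair, hence no > and no =: strictly increasing
      have hc1i : ((pvAllPairs l).countP (fun p => decide (p.1 < p.2)) : Int) ≠ 0 := by
        exact_mod_cast hz1
      have hz2 : (pvAllPairs l).countP (fun p => decide (p.2 < p.1)) = 0 := by
        exact_mod_cast hc12 hc1i
      have hz3 : (pvAllPairs l).countP (fun p => p.1 == p.2) = 0 := by
        exact_mod_cast hc13 hc1i
      have hall : ∀ p ∈ pvAllPairs l, (decide (p.1 < p.2)) = true := by
        intro p hp
        have e2 := List.countP_eq_zero.mp hz2 p hp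
        have e3 := List.countP_eq_zero.mp hz3 p hp
        simp only [decide_eq_true_eq] at e2 ⊢
        simp only [beq_iff_eq] at e3
        omega
      rw [h1.mpr hall]
      simp

-- ===== VERDICT (by name: the statement is the Claim_ definition above) =====
theorem lista_ordenada_spec : Claim_equal_lista_ordenada := by
  intro l _
  simpa [Spec_lista_ordenada] using pvMain l
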